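-- pv_equiv track=rewrite | github.com/debby294/Parallelismen | alliterationen/alliterationen.py | get_ids
-- ===== SOURCE A (Python) =====
-- def get_ids(everygrams):
-- 	ids = []
-- 	for egram in everygrams:
-- 		for i, a in egram:
-- 			for k, b in egram:
-- 				if a == b and i != k:
-- 					if (i, k) not in ids and (k, i) not in ids:
-- 						ids.append((i, k))
-- 	return ids
-- ===== SOURCE B (Python) =====
-- def get_ids(everygrams):
--     ids = []
--     seen = set()
--     for egram in everygrams:
--         for idx, (i, a) in enumerate(egram):
--             for k, b in egram[idx + 1:]:
--                 if a == b and i != k: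
--                     key = (i, k) if i <= k else (k, i)
--                     if key not in seen:
--                         seen.add(key)
--                         ids.append((i, k))
--     return ids
-- ===== Notes on version B (the rewrite author's own statement) =====
-- stated objective: alternative
-- what changed: Replaces the full O(m^2) pairwise scan plus an O(|ids|) list-membership test per candidate with a triangular (each-later-element) scan and a set of normalized pairs for duplicate detection.
import Mathlib
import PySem

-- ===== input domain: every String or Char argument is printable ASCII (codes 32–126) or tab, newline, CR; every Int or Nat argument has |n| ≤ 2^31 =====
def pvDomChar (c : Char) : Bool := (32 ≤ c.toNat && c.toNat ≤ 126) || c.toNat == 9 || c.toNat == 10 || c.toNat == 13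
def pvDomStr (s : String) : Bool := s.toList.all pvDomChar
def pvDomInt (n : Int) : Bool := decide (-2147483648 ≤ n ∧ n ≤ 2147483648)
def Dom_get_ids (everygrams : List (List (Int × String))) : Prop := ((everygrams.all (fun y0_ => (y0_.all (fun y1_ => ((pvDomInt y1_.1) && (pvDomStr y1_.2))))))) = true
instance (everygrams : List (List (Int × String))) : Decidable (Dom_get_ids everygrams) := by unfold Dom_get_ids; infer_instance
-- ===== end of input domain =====

-- B replaces A's full pairwise scan and its list-membership duplicate test with a
-- later-elements-only scan plus a set of normalized pairs (alternative structure).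

-- ===== PORT A =====
-- the body of A's innermost loop: append (i,k) if values equal, ids differ, pair unseen in ids
def pvStepA (x z : Int × String) (ids : List (Int × Int)) : List (Int × Int) :=
  if x.2 = z.2 ∧ x.1 ≠ z.1 ∧ (x.1, z.1) ∉ ids ∧ (z.1, x.1) ∉ ids then
    ids ++ [(x.1, z.1)]
  else ids

def get_ids (everygrams : List (List (Int × String))) : List (Int × Int) :=
  everygrams.foldl (fun ids egram =>
    egram.foldl (fun ids x =>
      egram.foldl (fun ids z => pvStepA x z ids) ids) ids) []

-- ===== PORT B =====
-- the body of B's innermost loop: state = (ids, seen); normalized key checked against the set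
def pvStepB (x z : Int × String) (st : List (Int × Int) × PySem.Set (Int × Int)) :
    List (Int × Int) × PySem.Set (Int × Int) :=
  if x.2 = z.2 ∧ x.1 ≠ z.1 then
    let key := if x.1 ≤ z.1 then (x.1, z.1) else (z.1, x.1)
    if key ∈ st.2 then st
    else (st.1 ++ [(x.1, z.1)], PySem.Set.add st.2 key)
  else st

-- B's outer loop over one egram: `for idx, (i,a) in enumerate(egram): for k,b in egram[idx+1:]`
def pvPassB : List (Int × String) → (List (Int × Int) × PySem.Set (Int × Int)) →
    (List (Int × Int) × PySem.Set (Int × Int))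
  | [], st => st
  | x :: rest, st => pvPassB rest (rest.foldl (fun st z => pvStepB x z st) st)

def get_ids_alt (everygrams : List (List (Int × String))) : List (Int × Int) :=
  (everygrams.foldl (fun st egram => pvPassB egram st) ([], PySem.Set.empty)).1

-- ===== PRECONDITION & SPEC =====
def Spec_get_ids (everygrams : List (List (Int × String))) (out : List (Int × Int)) : Prop := out = get_ids_alt everygrams
instance (everygrams : List (List (Int × String))) (out : List (Int × Int)) : Decidable (Spec_get_ids everygrams out) := by unfold Spec_get_ids; infer_instance

-- ===== CLAIM (what is proved, stated in full; the proofs are below) =====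
def Claim_equal_get_ids : Prop := ∀ (everygrams : List (List (Int × String))), Dom_get_ids everygrams → Spec_get_ids everygrams (get_ids everygrams)

-- ===== LEMMAS AND PROOFS =====

def pvKey (i k : Int) : Int × Int := if i ≤ k then (i, k) else (k, i)

-- the seen set holds exactly the normalized keys of pairs in ids, and all pairs in ids have distinct components
def pvInv (ids : List (Int × Int)) (seen : PySem.Set (Int × Int)) : Prop :=
  (∀ i k : Int, pvKey i k ∈ seen ↔ ((i, k) ∈ ids ∨ (k, i) ∈ ids)) ∧
  (∀ p ∈ ids, p.1 ≠ p.2)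

theorem pvKey_eq_iff (i k i' k' : Int) :
    pvKey i' k' = pvKey i k ↔ (i' = i ∧ k' = k) ∨ (i' = k ∧ k' = i) := by
  unfold pvKey; split_ifs <;> simp [Prod.ext_iff] <;> omega

theorem pvStepB_eq (x z : Int × String) (ids : List (Int × Int))
    (seen : PySem.Set (Int × Int)) (hInv : pvInv ids seen) :
    ∃ seen', pvStepB x z (ids, seen) = (pvStepA x z ids, seen') ∧
      pvInv (pvStepA x z ids) seen' := by
  obtain ⟨h1, h2⟩ := hInv
  unfold pvStepB pvStepA
  by_cases hc : x.2 = z.2 ∧ x.1 ≠ z.1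
  · rw [if_pos hc]
    simp only
    have hkey : (if x.1 ≤ z.1 then (x.1, z.1) else (z.1, x.1)) = pvKey x.1 z.1 := rfl
    rw [hkey]
    by_cases hm : pvKey x.1 z.1 ∈ seen
    · have hmem := (h1 x.1 z.1).mp hm
      rw [if_pos hm, if_neg (by tauto)]
      exact ⟨seen, rfl, h1, h2⟩
    · have hmem := fun h => hm ((h1 x.1 z.1).mpr h)
      rw [if_neg hm, if_pos ⟨hc.1, hc.2, fun h => hmem (Or.inl h), fun h => hmem (Or.inr h)⟩]
      refine ⟨PySem.Set.add seen (pvKey x.1 z.1), rfl, ?_, ?_⟩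
      · intro i k
        rw [PySem.Set.mem_add, h1 i k, pvKey_eq_iff]
        simp only [List.mem_append, List.mem_singleton, Prod.ext_iff]
        constructor
        · rintro ((h | h) | h) <;> tauto
        · rintro ((h | ⟨ha, hb⟩) | (h | ⟨ha, hb⟩)) <;> tauto
      · intro p hp
        rcases List.mem_append.mp hp with h | h
        · exact h2 p h
        · simp at h; subst h; exact hc.2
  · rw [if_neg hc, if_neg (by tauto)]
    exact ⟨seen, rfl, h1, h2⟩

theorem pvFoldB_eq (l : List (Int × String)) (x : Int × String) (ids : List (Int × Int))
    (seen : PySem.Set (Int × Int)) (hInv : pvInv ids seen) :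
    ∃ seen', l.foldl (fun st z => pvStepB x z st) (ids, seen) =
      (l.foldl (fun ids z => pvStepA x z ids) ids, seen') ∧
      pvInv (l.foldl (fun ids z => pvStepA x z ids) ids) seen' := by
  induction l generalizing ids seen with
  | nil => exact ⟨seen, rfl, hInv⟩
  | cons z l ih =>
    obtain ⟨seen1, heq, hInv1⟩ := pvStepB_eq x z ids seen hInv
    simp only [List.foldl_cons, heq]
    exact ih _ _ hInv1

theorem pvFoldA_mono (l : List (Int × String)) (x : Int × String) (ids : List (Int × Int))
    (p : Int × Int) (hp : p ∈ ids) : p ∈ l.foldl (fun ids z => pvStepA x z ids) ids := by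
  induction l generalizing ids with
  | nil => exact hp
  | cons z l ih =>
    refine ih _ ?_
    unfold pvStepA
    dsimp only
    split
    · exact List.mem_append.mpr (Or.inl hp)
    · exact hp

theorem pvFoldA_covers (l : List (Int × String)) (x z : Int × String) (ids : List (Int × Int))
    (hz : z ∈ l) (hv : z.2 = x.2) (hne : x.1 ≠ z.1) :
    (x.1, z.1) ∈ l.foldl (fun ids z => pvStepA x z ids) ids ∨
    (z.1, x.1) ∈ l.foldl (fun ids z => pvStepA x z ids) ids := by
  induction l generalizing ids with
  | nil => simp at hz
  | cons w l ih =>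
    rcases List.mem_cons.mp hz with h | h
    · subst h
      simp only [List.foldl_cons]
      by_cases hm : (x.1, z.1) ∈ ids ∨ (z.1, x.1) ∈ ids
      · have : (x.1, z.1) ∈ pvStepA x z ids ∨ (z.1, x.1) ∈ pvStepA x z ids := by
          unfold pvStepA; split
          · rcases hm with h | h
            · exact Or.inl (List.mem_append.mpr (Or.inl h))
            · exact Or.inr (List.mem_append.mpr (Or.inl h))
          · exact hm
        rcases this with h | h
        · exact Or.inl (pvFoldA_mono l x _ _ h)
        · exact Or.inr (pvFoldA_mono l x _ _ h)
      · have : (x.1, z.1) ∈ pvStepA x z ids := by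
          unfold pvStepA
          rw [if_pos ⟨hv.symm, hne, fun h => hm (Or.inl h), fun h => hm (Or.inr h)⟩]
          simp
        exact Or.inl (pvFoldA_mono l x _ _ this)
    · exact ih _ h

theorem pvFoldA_noop (l : List (Int × String)) (x : Int × String) (ids : List (Int × Int))
    (h : ∀ z ∈ l, x.2 = z.2 → x.1 ≠ z.1 → ((x.1, z.1) ∈ ids ∨ (z.1, x.1) ∈ ids)) :
    l.foldl (fun ids z => pvStepA x z ids) ids = ids := by
  induction l with
  | nil => rfl
  | cons z l ih =>
    have hz : pvStepA x z ids = ids := by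
      unfold pvStepA
      rw [if_neg]
      rintro ⟨hv, hne, hm1, hm2⟩
      rcases h z (List.mem_cons_self ..) hv hne with hh | hh
      · exact hm1 hh
      · exact hm2 hh
    simp only [List.foldl_cons, hz]
    exact ih (fun w hw => h w (List.mem_cons_of_mem _ hw))

theorem pvStepA_self (x : Int × String) (ids : List (Int × Int)) : pvStepA x x ids = ids := by
  simp [pvStepA]

theorem pvMain (rest pre : List (Int × String)) (ids : List (Int × Int))
    (seen : PySem.Set (Int × Int)) (hInv : pvInv ids seen)
    (H : ∀ y ∈ pre, ∀ z ∈ pre ++ rest, z.2 = y.2 → z.1 ≠ y.1 →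
      ((y.1, z.1) ∈ ids ∨ (z.1, y.1) ∈ ids)) :
    ∃ seen', pvPassB rest (ids, seen) =
      (rest.foldl (fun ids x => (pre ++ rest).foldl (fun ids z => pvStepA x z ids) ids) ids, seen') ∧
      pvInv (rest.foldl (fun ids x => (pre ++ rest).foldl (fun ids z => pvStepA x z ids) ids) ids) seen' := by
  induction rest generalizing pre ids seen with
  | nil => exact ⟨seen, rfl, hInv⟩
  | cons x rest ih =>
    obtain ⟨seen1, heq1, hInv1⟩ := pvFoldB_eq rest x ids seen hInv
    have hfull : (pre ++ x :: rest).foldl (fun ids z => pvStepA x z ids) ids =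
        rest.foldl (fun ids z => pvStepA x z ids) ids := by
      have hsplit : pre ++ x :: rest = (pre ++ [x]) ++ rest := by simp
      rw [hsplit, List.foldl_append, List.foldl_append]
      have hpre : pre.foldl (fun ids z => pvStepA x z ids) ids = ids := by
        apply pvFoldA_noop
        intro z hz hv hne
        exact Or.symm (H z hz x (by simp) hv hne)
      rw [hpre]
      simp [pvStepA_self]
    have H' : ∀ y ∈ pre ++ [x], ∀ z ∈ (pre ++ [x]) ++ rest, z.2 = y.2 → z.1 ≠ y.1 →
        ((y.1, z.1) ∈ rest.foldl (fun ids z => pvStepA x z ids) ids ∨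
         (z.1, y.1) ∈ rest.foldl (fun ids z => pvStepA x z ids) ids) := by
      intro y hy z hz h1 h2
      have hz' : z ∈ pre ++ x :: rest := by simpa using hz
      rcases List.mem_append.mp hy with hy | hy
      · rcases H y hy z hz' h1 h2 with h | h
        · exact Or.inl (pvFoldA_mono rest x _ _ h)
        · exact Or.inr (pvFoldA_mono rest x _ _ h)
      · simp only [List.mem_singleton] at hy
        rw [hy] at h1 h2 ⊢
        rcases List.mem_append.mp hz' with hzp | hzc
        · rcases H z hzp x (by simp) h1.symm (Ne.symm h2) with h | h
          · exact Or.inr (pvFoldA_mono rest x _ _ h)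
          · exact Or.inl (pvFoldA_mono rest x _ _ h)
        · rcases List.mem_cons.mp hzc with hzx | hzr
          · exact absurd (congrArg Prod.fst hzx) h2
          · exact pvFoldA_covers rest x z ids hzr h1 (Ne.symm h2)
    obtain ⟨seen', heq2, hInv2⟩ := ih (pre ++ [x]) _ seen1 hInv1 H'
    have hlist : (pre ++ [x]) ++ rest = pre ++ x :: rest := by simp
    rw [hlist] at heq2 hInv2
    refine ⟨seen', ?_, ?_⟩
    · show pvPassB rest (rest.foldl (fun st z => pvStepB x z st) (ids, seen)) = _
      rw [heq1, heq2]
      simp only [List.foldl_cons, hfull]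
    · simpa only [List.foldl_cons, hfull] using hInv2

theorem pvTop (egs : List (List (Int × String))) (ids : List (Int × Int))
    (seen : PySem.Set (Int × Int)) (hInv : pvInv ids seen) :
    ∃ seen', egs.foldl (fun st egram => pvPassB egram st) (ids, seen) =
      (egs.foldl (fun ids egram =>
        egram.foldl (fun ids x =>
          egram.foldl (fun ids z => pvStepA x z ids) ids) ids) ids, seen') ∧
      pvInv (egs.foldl (fun ids egram =>
        egram.foldl (fun ids x =>
          egram.foldl (fun ids z => pvStepA x z ids) ids) ids) ids) seen' := by
  induction egs generalizing ids seen with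
  | nil => exact ⟨seen, rfl, hInv⟩
  | cons e egs ih =>
    obtain ⟨seen1, heq1, hInv1⟩ := pvMain e [] ids seen hInv (by intro y hy; simp at hy)
    simp only [List.nil_append] at heq1 hInv1
    obtain ⟨seen', heq2, hInv2⟩ := ih _ _ hInv1
    refine ⟨seen', ?_, ?_⟩
    · simp only [List.foldl_cons, heq1, heq2]
    · simpa only [List.foldl_cons] using hInv2

-- ===== VERDICT (by name: the statement is the Claim_ definition above) =====
theorem get_ids_spec : Claim_equal_get_ids := by
  intro egs _
  unfold Spec_get_ids get_ids get_ids_alt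
  have hInv : pvInv [] PySem.Set.empty := by
    constructor
    · intro i k; simp [PySem.Set.empty]
    · intro p hp; simp at hp
  obtain ⟨seen', heq, _⟩ := pvTop egs [] PySem.Set.empty hInv
  rw [heq]
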